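-- pv_equiv track=rewrite | github.com/trackSabha/trackSabha | webapp/chatbot.py | _are_geographic_related
-- ===== SOURCE A (Python) =====
-- from typing import Dict, List, Any, Optional, Tuple, Set, AsyncGenerator
--
-- def _are_geographic_related(node1: Dict, node2: Dict) -> bool:
--     """Check if two nodes are geographic/constituency related."""
--     geo_terms = ["parish", "constituency", "christ church", "st michael", "st james", "st peter",
--                 "st andrew", "st joseph", "st john", "st philip", "st lucy", "st thomas", "st george",
--                 "bridgetown", "barbados", "caribbean", "region", "area", "district", "community"]
--
--     name1 = (node1.get("name", "") + " " + node1.get("description", "")).lower()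
--     name2 = (node2.get("name", "") + " " + node2.get("description", "")).lower()
--
--     # Check for shared geographic terms
--     for term in geo_terms:
--         if term in name1 and term in name2:
--             return True
--
--     return False
-- ===== SOURCE B (Python) =====
-- def _are_geographic_related(node1, node2):
--     """Check if two nodes are geographic/constituency related."""
--     geo_terms = ["parish", "constituency", "christ church", "st michael", "st james", "st peter",
--                 "st andrew", "st joseph", "st john", "st philip", "st lucy", "st thomas", "st george",
--                 "bridgetown", "barbados", "caribbean", "region", "area", "district", "community"]
--
--     def term_mask(node):
--         # One left-to-right scan of the text: at each position, record (as a bit)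
--         # every geo term that starts there.  No per-term substring search.
--         text = (node.get("name", "") + " " + node.get("description", "")).lower()
--         mask = 0
--         for i in range(len(text)):
--             for j, t in enumerate(geo_terms):
--                 if text.startswith(t, i):
--                     mask |= 1 << j
--         return mask
--
--     return term_mask(node1) & term_mask(node2) != 0
-- ===== Notes on version B (the rewrite author's own statement) =====
-- stated objective: alternative
-- what changed: Instead of testing each geo term with a substring search in both texts, B scans each text's positions once, building an integer bitmask of the terms that start at some position (a multi-pattern position scan), and returns whether the bitwise AND of the two masks is nonzero.
import Mathlib
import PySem

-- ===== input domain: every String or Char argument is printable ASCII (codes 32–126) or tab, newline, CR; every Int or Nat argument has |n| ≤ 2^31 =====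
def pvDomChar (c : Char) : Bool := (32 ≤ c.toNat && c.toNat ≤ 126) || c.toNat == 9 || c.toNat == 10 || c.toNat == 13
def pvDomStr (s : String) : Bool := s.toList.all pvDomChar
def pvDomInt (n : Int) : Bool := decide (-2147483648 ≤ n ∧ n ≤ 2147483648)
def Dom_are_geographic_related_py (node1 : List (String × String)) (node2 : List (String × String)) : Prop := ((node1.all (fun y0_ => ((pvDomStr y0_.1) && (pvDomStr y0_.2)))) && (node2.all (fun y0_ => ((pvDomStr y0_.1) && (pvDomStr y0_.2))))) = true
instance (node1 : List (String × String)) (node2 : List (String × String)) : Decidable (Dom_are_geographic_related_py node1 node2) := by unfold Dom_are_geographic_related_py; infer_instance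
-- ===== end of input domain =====

-- B replaces A's per-term substring-search loop by a single left-to-right position scan of each
-- text building an integer bitmask of the terms starting at each position, then tests whether the
-- bitwise AND of the two masks is nonzero (objective: alternative).


-- ===== PORT A =====
def pvGeoTerms : List String :=
  ["parish", "constituency", "christ church", "st michael", "st james", "st peter",
   "st andrew", "st joseph", "st john", "st philip", "st lucy", "st thomas", "st george",
   "bridgetown", "barbados", "caribbean", "region", "area", "district", "community"]

-- node.get("name", "") + " " + node.get("description", ""), lowered
def pvNodeText (node : List (String × String)) : String :=
  PySem.Str.lower ((PySem.Dict.mk node).getD "name" "" ++ " " ++ (PySem.Dict.mk node).getD "description" "")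

-- the 'for term in geo_terms: if term in name1 and term in name2: return True' loop
def pvLoopA (ts : List String) (name1 name2 : String) : Bool :=
  match ts with
  | [] => false
  | term :: rest =>
      if PySem.Str.isIn term name1 && PySem.Str.isIn term name2 then true
      else pvLoopA rest name1 name2

def are_geographic_related_py (node1 : List (String × String)) (node2 : List (String × String)) : Bool :=
  pvLoopA pvGeoTerms (pvNodeText node1) (pvNodeText node2)

-- ===== PORT B =====
-- text.startswith(t, i): exact for 0 ≤ i ≤ len(text), the only values the scan uses
-- (Python's startswith with an in-range start position is a prefix test on text[i:]).
-- term_mask: for i in range(len(text)): for j, t in enumerate(geo_terms): if text.startswith(t, i): mask |= 1 << j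
def pvScan (text : List Char) : Nat :=
  (List.range text.length).foldl
    (fun mask i =>
      pvGeoTerms.zipIdx.foldl
        (fun m p => if PySem.Chars.startswith (text.drop i) p.1.toList then m ||| (1 <<< p.2) else m)
        mask)
    0

def pvTermMask (node : List (String × String)) : Nat :=
  pvScan (pvNodeText node).toList

def are_geographic_related_py_alt (node1 : List (String × String)) (node2 : List (String × String)) : Bool :=
  decide (pvTermMask node1 &&& pvTermMask node2 ≠ 0)

-- ===== PRECONDITION & SPEC =====
def Spec_are_geographic_related_py (node1 : List (String × String)) (node2 : List (String × String)) (out : Bool) : Prop := out = are_geographic_related_py_alt node1 node2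
instance (node1 : List (String × String)) (node2 : List (String × String)) (out : Bool) : Decidable (Spec_are_geographic_related_py node1 node2 out) := by unfold Spec_are_geographic_related_py; infer_instance

-- ===== CLAIM (what is proved, stated in full; the proofs are below) =====
def Claim_equal_are_geographic_related_py : Prop := ∀ (node1 : List (String × String)) (node2 : List (String × String)), Dom_are_geographic_related_py node1 node2 → Spec_are_geographic_related_py node1 node2 (are_geographic_related_py node1 node2)

-- ===== LEMMAS AND PROOFS =====

-- A's early-return loop is List.any of the combined test
theorem pvLoopA_eq_any (ts : List String) (n1 n2 : String) :
    pvLoopA ts n1 n2 = ts.any (fun t => PySem.Str.isIn t n1 && PySem.Str.isIn t n2) := by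
  induction ts with
  | nil => rfl
  | cons t rest ih =>
      simp only [pvLoopA, List.any_cons, ih]
      cases PySem.Str.isIn t n1 && PySem.Str.isIn t n2 <;> simp

-- bits of the inner enumerate fold
theorem pvInnerBit (c : String → Bool) (l : List (String × Nat)) (mask : Nat) (k : Nat) :
    ((l.foldl (fun m p => if c p.1 then m ||| (1 <<< p.2) else m) mask).testBit k)
      = (mask.testBit k || l.any (fun p => c p.1 && p.2 == k)) := by
  induction l generalizing mask with
  | nil => simp
  | cons p rest ih =>
      simp only [List.foldl_cons, List.any_cons, ih]
      by_cases h : c p.1 = true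
      · simp [h, Nat.testBit_or, Nat.one_shiftLeft, Nat.testBit_two_pow]
        by_cases hk : p.2 = k <;> simp [hk, Bool.or_comm, Bool.or_left_comm]
      · simp [h]

-- bits of an outer fold whose step only adds bits described by g
theorem pvOuterBit (f : Nat → Nat → Nat) (g : Nat → Nat → Bool)
    (hf : ∀ m i k, (f m i).testBit k = (m.testBit k || g i k))
    (l : List Nat) (m : Nat) (k : Nat) :
    ((l.foldl f m).testBit k) = (m.testBit k || l.any (fun i => g i k)) := by
  induction l generalizing m with
  | nil => simp
  | cons i rest ih => simp [ih, hf, Bool.or_assoc]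

-- characterisation of the mask's bits: bit k is set iff term k occurs in the text
theorem pvScan_testBit (text : List Char) (k : Nat) :
    (pvScan text).testBit k
      = ((pvGeoTerms.zipIdx.any (fun p => PySem.Chars.isIn p.1.toList text && p.2 == k))) := by
  have step : ∀ (m i k : Nat),
      ((fun mask i =>
        pvGeoTerms.zipIdx.foldl
          (fun m p => if PySem.Chars.startswith (text.drop i) p.1.toList then m ||| (1 <<< p.2) else m)
          mask) m i).testBit k
      = (m.testBit k || pvGeoTerms.zipIdx.any
          (fun p => PySem.Chars.startswith (text.drop i) p.1.toList && p.2 == k)) :=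
    fun m i k => pvInnerBit (fun t => PySem.Chars.startswith (text.drop i) t.toList) _ m k
  rw [pvScan, pvOuterBit _ _ step]
  simp only [Nat.zero_testBit, Bool.false_or]
  rw [Bool.eq_iff_iff, List.any_eq_true]
  simp only [List.any_eq_true, List.mem_range, Bool.and_eq_true, beq_iff_eq]
  constructor
  · rintro ⟨i, hi, p, hp, hs, hk⟩
    refine ⟨p, hp, ?_, hk⟩
    rw [← PySem.Chars.exists_prefix_drop_iff_isIn]
    exact ⟨i, (PySem.Chars.startswith_iff _ _).1 hs⟩
  · rintro ⟨p, hp, hin, hk⟩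
    rw [← PySem.Chars.exists_prefix_drop_iff_isIn] at hin
    obtain ⟨i, hpre⟩ := hin
    -- every geo term is nonempty, so the matching position is inside the text
    have hall : ∀ t ∈ pvGeoTerms, t.toList ≠ [] := by decide
    have hne : p.1.toList ≠ [] := by
      refine hall p.1 ?_
      exact List.mem_of_getElem? ((List.mem_zipIdx_iff_getElem?).1 hp)
    have hi : i < text.length := by
      by_contra hge
      rw [List.drop_eq_nil_of_le (by omega)] at hpre
      exact hne (List.prefix_nil.mp hpre)
    exact ⟨i, hi, p, hp, (PySem.Chars.startswith_iff _ _).2 hpre, hk⟩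

theorem pvTermMask_testBit (node : List (String × String)) (k : Nat) :
    (pvTermMask node).testBit k
      = ((pvGeoTerms.zipIdx.any (fun p => PySem.Str.isIn p.1 (pvNodeText node) && p.2 == k))) := by
  rw [pvTermMask, pvScan_testBit]
  simp [PySem.Str.isIn_eq]

-- B's nonzero AND of the two masks is the same List.any as A's loop
theorem pvAlt_eq_any (node1 node2 : List (String × String)) :
    are_geographic_related_py_alt node1 node2
      = pvGeoTerms.any (fun t => PySem.Str.isIn t (pvNodeText node1) && PySem.Str.isIn t (pvNodeText node2)) := by
  unfold are_geographic_related_py_alt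
  rw [Bool.eq_iff_iff, decide_eq_true_iff, List.any_eq_true]
  constructor
  · intro hne
    by_contra hno
    simp only [not_exists, not_and] at hno
    apply hne
    apply Nat.zero_of_testBit_eq_false
    intro k
    rw [Nat.testBit_and, pvTermMask_testBit, pvTermMask_testBit]
    rw [Bool.and_eq_false_iff]
    by_cases h1 : (pvGeoTerms.zipIdx.any (fun p => PySem.Str.isIn p.1 (pvNodeText node1) && p.2 == k)) = true
    · right
      rw [Bool.eq_false_iff]
      intro h2
      rw [List.any_eq_true] at h1 h2
      obtain ⟨p, hp, hp1⟩ := h1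
      obtain ⟨q, hq, hq1⟩ := h2
      simp only [Bool.and_eq_true, beq_iff_eq] at hp1 hq1
      have e1 : pvGeoTerms[k]? = some p.1 := by
        have := (List.mem_zipIdx_iff_getElem?).1 hp; rwa [hp1.2] at this
      have e2 : pvGeoTerms[k]? = some q.1 := by
        have := (List.mem_zipIdx_iff_getElem?).1 hq; rwa [hq1.2] at this
      have hpq : p.1 = q.1 := by rw [e1] at e2; exact Option.some.inj e2
      exact hno p.1 (List.mem_of_getElem? e1)
        (by rw [Bool.and_eq_true]; exact ⟨hp1.1, hpq ▸ hq1.1⟩)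
    · left; exact Bool.eq_false_iff.mpr h1
  · rintro ⟨t, ht, hb⟩
    rw [Bool.and_eq_true] at hb
    obtain ⟨j, hj, rfl⟩ := List.getElem_of_mem ht
    intro h0
    have hk : (pvTermMask node1 &&& pvTermMask node2).testBit j = false := by
      rw [h0]; exact Nat.zero_testBit j
    rw [Nat.testBit_and, pvTermMask_testBit, pvTermMask_testBit] at hk
    have hmem : (pvGeoTerms[j], j) ∈ pvGeoTerms.zipIdx :=
      (List.mem_zipIdx_iff_getElem?).2 (by simp [hj])
    have h1 : pvGeoTerms.zipIdx.any (fun p => PySem.Str.isIn p.1 (pvNodeText node1) && p.2 == j) = true :=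
      List.any_eq_true.2 ⟨_, hmem, by simp only [beq_self_eq_true, Bool.and_true]; exact hb.1⟩
    have h2 : pvGeoTerms.zipIdx.any (fun p => PySem.Str.isIn p.1 (pvNodeText node2) && p.2 == j) = true :=
      List.any_eq_true.2 ⟨_, hmem, by simp only [beq_self_eq_true, Bool.and_true]; exact hb.2⟩
    rw [h1, h2] at hk
    simp at hk

-- ===== VERDICT (by name: the statement is the Claim_ definition above) =====
theorem are_geographic_related_py_spec : Claim_equal_are_geographic_related_py := by
  intro node1 node2 _
  unfold Spec_are_geographic_related_py are_geographic_related_py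
  rw [pvLoopA_eq_any, pvAlt_eq_any]
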